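-- pv_equiv track=rewrite | github.com/rohitcodism/ML-DS | practices/Exam/Python/Practice/Exam/ageCounter.py | count_age_groups
-- ===== SOURCE A (Python) =====
-- def count_age_groups(ages):
--     age_groups = {'26-35': 0, '36-45': 0, '46-55': 0}
--     for age in ages:
--         if 26 <= age <= 35:
--             age_groups['26-35'] += 1
--         elif 36 <= age <= 45:
--             age_groups['36-45'] += 1
--         elif 46 <= age <= 55:
--             age_groups['46-55'] += 1
--     return age_groups
-- ===== SOURCE B (Python) =====
-- def count_age_groups(ages):
--     # Three independent counting passes, one per bucket (simpler decomposition).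
--     n1 = sum(1 for age in ages if 26 <= age <= 35)
--     n2 = sum(1 for age in ages if 36 <= age <= 45)
--     n3 = sum(1 for age in ages if 46 <= age <= 55)
--     return {'26-35': n1, '36-45': n2, '46-55': n3}
-- ===== Notes on version B (the rewrite author's own statement) =====
-- stated objective: simpler
-- what changed: Replaces the single-pass if/elif dict-mutation loop with three independent counting passes (one sum per range) and a dict literal built once at the end.
import Mathlib
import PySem

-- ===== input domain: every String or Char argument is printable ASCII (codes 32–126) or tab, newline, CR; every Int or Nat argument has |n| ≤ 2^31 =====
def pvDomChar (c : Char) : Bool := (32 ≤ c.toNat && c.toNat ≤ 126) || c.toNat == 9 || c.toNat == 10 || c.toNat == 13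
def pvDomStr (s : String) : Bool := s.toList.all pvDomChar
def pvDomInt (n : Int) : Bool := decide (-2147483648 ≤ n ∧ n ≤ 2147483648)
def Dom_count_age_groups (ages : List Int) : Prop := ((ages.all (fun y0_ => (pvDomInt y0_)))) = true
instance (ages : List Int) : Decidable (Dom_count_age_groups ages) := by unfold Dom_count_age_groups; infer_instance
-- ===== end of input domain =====

-- B replaces A's single if/elif dict-mutation loop by three independent counting passes; objective: simpler.

-- ===== PORT A =====
def count_age_groups_step (d : PySem.Dict String Int) (age : Int) : PySem.Dict String Int :=
  if 26 ≤ age ∧ age ≤ 35 then d.modify "26-35" 0 (· + 1)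
  else if 36 ≤ age ∧ age ≤ 45 then d.modify "36-45" 0 (· + 1)
  else if 46 ≤ age ∧ age ≤ 55 then d.modify "46-55" 0 (· + 1)
  else d

def count_age_groups (ages : List Int) : List (String × Int) :=
  (ages.foldl count_age_groups_step
    (PySem.Dict.ofList [("26-35", 0), ("36-45", 0), ("46-55", 0)])).items

-- ===== PORT B =====
def count_age_groups_alt (ages : List Int) : List (String × Int) :=
  [("26-35", (ages.countP (fun age => 26 ≤ age && age ≤ 35) : Int)),
   ("36-45", (ages.countP (fun age => 36 ≤ age && age ≤ 45) : Int)),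
   ("46-55", (ages.countP (fun age => 46 ≤ age && age ≤ 55) : Int))]

-- ===== PRECONDITION & SPEC =====
def Spec_count_age_groups (ages : List Int) (out : List (String × Int)) : Prop := out = count_age_groups_alt ages
instance (ages : List Int) (out : List (String × Int)) : Decidable (Spec_count_age_groups ages out) := by unfold Spec_count_age_groups; infer_instance

-- ===== CLAIM (what is proved, stated in full; the proofs are below) =====
def Claim_equal_count_age_groups : Prop := ∀ (ages : List Int), Dom_count_age_groups ages → Spec_count_age_groups ages (count_age_groups ages)

-- ===== LEMMAS AND PROOFS =====
theorem count_age_groups_fold (ages : List Int) (a b c : Int) :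
    (ages.foldl count_age_groups_step (PySem.Dict.mk [("26-35", a), ("36-45", b), ("46-55", c)])).items
      = [("26-35", a + (ages.countP (fun age => 26 ≤ age && age ≤ 35) : Int)),
         ("36-45", b + (ages.countP (fun age => 36 ≤ age && age ≤ 45) : Int)),
         ("46-55", c + (ages.countP (fun age => 46 ≤ age && age ≤ 55) : Int))] := by
  induction ages generalizing a b c with
  | nil => simp
  | cons x xs ih =>
    simp only [List.foldl_cons, count_age_groups_step, List.countP_cons]
    by_cases h1 : 26 ≤ x ∧ x ≤ 35
    · have e : (PySem.Dict.mk [("26-35", a), ("36-45", b), ("46-55", c)]).modify "26-35" 0 (· + 1)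
          = PySem.Dict.mk [("26-35", a + 1), ("36-45", b), ("46-55", c)] := by
        simp [PySem.Dict.modify, PySem.Dict.insert, PySem.Dict.getD, PySem.Dict.get?, PySem.Dict.contains]
      have h2 : ¬ (36 ≤ x ∧ x ≤ 45) := by omega
      have h3 : ¬ (46 ≤ x ∧ x ≤ 55) := by omega
      simp [h1, h2, h3, e, ih]
      ring
    · by_cases h2 : 36 ≤ x ∧ x ≤ 45
      · have e : (PySem.Dict.mk [("26-35", a), ("36-45", b), ("46-55", c)]).modify "36-45" 0 (· + 1)
            = PySem.Dict.mk [("26-35", a), ("36-45", b + 1), ("46-55", c)] := by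
          simp [PySem.Dict.modify, PySem.Dict.insert, PySem.Dict.getD, PySem.Dict.get?, PySem.Dict.contains]
        have h3 : ¬ (46 ≤ x ∧ x ≤ 55) := by omega
        simp [h1, h2, h3, e, ih]
        ring
      · by_cases h3 : 46 ≤ x ∧ x ≤ 55
        · have e : (PySem.Dict.mk [("26-35", a), ("36-45", b), ("46-55", c)]).modify "46-55" 0 (· + 1)
              = PySem.Dict.mk [("26-35", a), ("36-45", b), ("46-55", c + 1)] := by
            simp [PySem.Dict.modify, PySem.Dict.insert, PySem.Dict.getD, PySem.Dict.get?, PySem.Dict.contains]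
          simp [h1, h2, h3, e, ih]
          ring
        · simp [h1, h2, h3, ih]

-- ===== VERDICT (by name: the statement is the Claim_ definition above) =====
theorem count_age_groups_spec : Claim_equal_count_age_groups := by
  intro ages _
  unfold Spec_count_age_groups count_age_groups count_age_groups_alt
  have := count_age_groups_fold ages 0 0 0
  simpa [PySem.Dict.ofList] using this
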